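-- pv_equiv track=rewrite | github.com/Kesendo/R-equals-C-Psi-squared | simulations/framework/coherence_block.py | _block_index_maps
-- ===== SOURCE A (Python) =====
-- def popcount_states(N, n):
--     """List of computational basis states (as ints) with popcount n.
--
--     Big-endian: site 0 = MSB. Sorted by integer value.
--     """
--     return [x for x in range(2 ** N) if bin(x).count("1") == n]
--
-- def _block_index_maps(N, n):
--     """(P_n, P_np1, p_to_idx, q_to_idx, Mnp1, Mtot) — the boilerplate every
--     block-level constructor needs. Big-endian flat index is
--     `p_to_idx[p] * Mnp1 + q_to_idx[q]`.
--     """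
--     P_n = popcount_states(N, n)
--     P_np1 = popcount_states(N, n + 1)
--     Mnp1 = len(P_np1)
--     return (P_n, P_np1,
--             {p: i for i, p in enumerate(P_n)},
--             {q: i for i, q in enumerate(P_np1)},
--             Mnp1, len(P_n) * Mnp1)
-- ===== SOURCE B (Python) =====
-- def _popcount_states_upto(N, nmax):
--     """cols[m] = sorted list of N-bit states with popcount m, for 0 <= m <= min(N, nmax).
--     Iterative Pascal-triangle DP over the bit count k:
--     states(k+1, m) = states(k, m) + [2^k + x for x in states(k, m-1)]."""
--     cols = [[0]]
--     for k in range(N):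
--         new = [cols[0]]
--         for m in range(1, min(k + 1, nmax) + 1):
--             prev = cols[m] if m < len(cols) else []
--             new.append(prev + [(1 << k) + x for x in cols[m - 1]])
--         cols = new
--     return cols
--
-- def _block_index_maps(N, n):
--     if n + 1 < 0:
--         P_n, P_np1 = [], []
--     else:
--         cols = _popcount_states_upto(N, n + 1)
--         P_n = cols[n] if 0 <= n < len(cols) else []
--         P_np1 = cols[n + 1] if n + 1 < len(cols) else []
--     Mnp1 = len(P_np1)
--     return (P_n, P_np1,
--             {p: i for i, p in enumerate(P_n)},
--             {q: i for i, q in enumerate(P_np1)},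
--             Mnp1, len(P_n) * Mnp1)
-- ===== Notes on version B (the rewrite author's own statement) =====
-- stated objective: alternative
-- what changed: A filters all 2^N integers by popcount (twice); B builds each sorted fixed-popcount column directly with a Pascal-triangle dynamic program over the bit count (states(k+1,m) = states(k,m) + shifted states(k,m-1)), touching only the columns up to n+1.
import Mathlib
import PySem

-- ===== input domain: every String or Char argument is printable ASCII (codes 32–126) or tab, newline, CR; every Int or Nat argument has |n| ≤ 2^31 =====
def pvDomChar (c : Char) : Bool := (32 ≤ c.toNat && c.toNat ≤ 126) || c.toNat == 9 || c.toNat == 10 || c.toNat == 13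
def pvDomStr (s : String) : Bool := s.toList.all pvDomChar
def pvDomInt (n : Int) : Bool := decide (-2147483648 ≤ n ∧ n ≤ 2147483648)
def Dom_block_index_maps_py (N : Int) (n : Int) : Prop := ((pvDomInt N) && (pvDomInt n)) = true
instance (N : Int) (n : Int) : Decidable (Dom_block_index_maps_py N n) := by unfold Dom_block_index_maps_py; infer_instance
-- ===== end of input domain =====

-- B replaces A's filter over all 2^N integers by a Pascal-triangle dynamic program that
-- builds each sorted fixed-popcount column directly (a different algorithm; return value proved equal).


-- ===== PORT A =====
-- bin(x).count("1") ported by hand as the standard halving recursion; exact for x ≥ 0,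
-- which covers every x produced by range(2**N)
def pvPopA (x : Nat) : Nat :=
  if x = 0 then 0 else x % 2 + pvPopA (x / 2)
decreasing_by exact Nat.div_lt_self (by omega) (by omega)

-- [x for x in range(2 ** N) if bin(x).count("1") == n]
def popcount_states (N : Int) (n : Int) : List Int :=
  (PySem.List.pyRange 0 (2 ^ N.toNat) 1).filter (fun x => decide ((pvPopA x.toNat : Int) = n))

-- {p: i for i, p in enumerate(xs)}, returned as its items list
def pvDictOfEnum (xs : List Int) : List (Int × Int) :=
  ((PySem.List.enumerate xs).foldl (fun d ip => d.insert ip.2 ip.1) PySem.Dict.empty).items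

def block_index_maps_py (N : Int) (n : Int) : List Int × List Int × (List (Int × Int)) × (List (Int × Int)) × Int × Int :=
  let P_n := popcount_states N n
  let P_np1 := popcount_states N (n + 1)
  let Mnp1 : Int := (P_np1.length : Int)
  (P_n, P_np1, pvDictOfEnum P_n, pvDictOfEnum P_np1, Mnp1, (P_n.length : Int) * Mnp1)

-- ===== PORT B =====
-- one DP step of Source B's _popcount_states_upto: extend every fixed-popcount column of
-- k-bit states to (k+1)-bit states (the body of the 'for k in range(N)' loop)
def pvStep (nmax : Int) (cols : List (List Int)) (k : Int) : List (List Int) :=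
  PySem.List.pyGetD cols 0 [] ::
    (PySem.List.pyRange 1 (min (k + 1) nmax + 1) 1).map (fun m =>
      (if m < (cols.length : Int) then PySem.List.pyGetD cols m [] else []) ++
        (PySem.List.pyGetD cols (m - 1) []).map (fun x => (1 : Int) <<< k.toNat + x))

-- _popcount_states_upto(N, nmax): the 'for k in range(N)' loop as a fold
def pvColsUpto (N : Int) (nmax : Int) : List (List Int) :=
  (PySem.List.pyRange 0 N 1).foldl (pvStep nmax) [[0]]

def block_index_maps_py_alt (N : Int) (n : Int) : List Int × List Int × (List (Int × Int)) × (List (Int × Int)) × Int × Int :=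
  let Pp : List Int × List Int :=
    if n + 1 < 0 then ([], [])
    else
      let cols := pvColsUpto N (n + 1)
      (if 0 ≤ n ∧ n < (cols.length : Int) then PySem.List.pyGetD cols n [] else [],
       if n + 1 < (cols.length : Int) then PySem.List.pyGetD cols (n + 1) [] else [])
  let P_n := Pp.1
  let P_np1 := Pp.2
  let Mnp1 : Int := (P_np1.length : Int)
  (P_n, P_np1, pvDictOfEnum P_n, pvDictOfEnum P_np1, Mnp1, (P_n.length : Int) * Mnp1)

-- ===== PRECONDITION & SPEC =====
-- A raises TypeError for N < 0 (2**N is a float there, which range() rejects); Pre_ excludes exactly those inputs.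
def Pre_block_index_maps_py (N : Int) (n : Int) : Prop := 0 ≤ N
instance (N : Int) (n : Int) : Decidable (Pre_block_index_maps_py N n) := by unfold Pre_block_index_maps_py; infer_instance

def pvWitness_block_index_maps_py : Int × Int := (3, 1)

def Spec_block_index_maps_py (N : Int) (n : Int) (out : List Int × List Int × (List (Int × Int)) × (List (Int × Int)) × Int × Int) : Prop := out = block_index_maps_py_alt N n
instance (N : Int) (n : Int) (out : List Int × List Int × (List (Int × Int)) × (List (Int × Int)) × Int × Int) : Decidable (Spec_block_index_maps_py N n out) := by unfold Spec_block_index_maps_py; infer_instance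

-- ===== CLAIM (what is proved, stated in full; the proofs are below) =====
def Claim_equal_block_index_maps_py : Prop := ∀ (N : Int) (n : Int), Dom_block_index_maps_py N n → Pre_block_index_maps_py N n → Spec_block_index_maps_py N n (block_index_maps_py N n)

-- ===== LEMMAS AND PROOFS =====

-- the Nat-level filter both ports are reduced to
def pvF (k : Nat) (n : Int) : List Nat :=
  (List.range (2 ^ k)).filter (fun x => decide ((pvPopA x : Int) = n))

lemma pvPopA_zero : pvPopA 0 = 0 := by
  rw [pvPopA]
  simp

lemma pvPopA_eq (x : Nat) : pvPopA x = x % 2 + pvPopA (x / 2) := by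
  rw [pvPopA]
  split_ifs with h
  · subst h; rw [pvPopA_zero]
  · rfl

lemma pvPopA_le (k : Nat) : ∀ x, x < 2 ^ k → pvPopA x ≤ k := by
  induction k with
  | zero => intro x hx; interval_cases x; rw [pvPopA_zero]
  | succ k ih =>
    intro x hx
    rw [pvPopA_eq]
    have h2 : x / 2 < 2 ^ k := by
      have : 2 ^ (k + 1) = 2 * 2 ^ k := by ring
      omega
    have := ih (x / 2) h2
    omega

lemma pvPopA_add_pow (k : Nat) : ∀ x, x < 2 ^ k → pvPopA (2 ^ k + x) = pvPopA x + 1 := by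
  induction k with
  | zero =>
    intro x hx
    interval_cases x
    rw [pvPopA_eq]
    norm_num [pvPopA_zero]
  | succ k ih =>
    intro x hx
    have hpow : 2 ^ (k + 1) = 2 * 2 ^ k := by ring
    have hdiv : (2 ^ (k + 1) + x) / 2 = 2 ^ k + x / 2 := by omega
    have hmod : (2 ^ (k + 1) + x) % 2 = x % 2 := by omega
    rw [pvPopA_eq (2 ^ (k + 1) + x), hdiv, hmod, ih (x / 2) (by omega), pvPopA_eq x]
    omega

lemma pvF_nil (k : Nat) (n : Int) (h : n < 0 ∨ (k : Int) < n) : pvF k n = [] := by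
  unfold pvF
  rw [List.filter_eq_nil_iff]
  intro x hx
  have hx' : x < 2 ^ k := List.mem_range.mp hx
  have := pvPopA_le k x hx'
  simp only [decide_eq_true_eq]
  omega

lemma pvF_succ (k : Nat) (n : Int) :
    pvF (k + 1) n = pvF k n ++ (pvF k (n - 1)).map (fun x => 2 ^ k + x) := by
  unfold pvF
  have hsplit : (2 : Nat) ^ (k + 1) = 2 ^ k + 2 ^ k := by ring
  rw [hsplit, List.range_add, List.filter_append]
  congr 1
  rw [List.filter_map]
  congr 1
  apply List.filter_congr
  intro x hx
  have hx' : x < 2 ^ k := List.mem_range.mp hx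
  simp only [Function.comp, pvPopA_add_pow k x hx', decide_eq_decide]
  push_cast
  omega

lemma pcs_eq_pvF (k : Nat) (n : Int) :
    popcount_states (k : Int) n = List.map (fun x : Nat => (x : Int)) (pvF k n) := by
  unfold popcount_states pvF
  rw [PySem.List.pyRange_one]
  have h1 : (((2 : Int) ^ ((k : Int)).toNat) - 0).toNat = 2 ^ k := by
    rw [Int.toNat_natCast, sub_zero,
      show ((2 : Int) ^ k) = ((2 ^ k : Nat) : Int) by push_cast; ring]
    exact Int.toNat_natCast _
  rw [h1, List.filter_map]
  have h2 : (fun j : Nat => (0 : Int) + (j : Int)) = (fun j : Nat => (j : Int)) := by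
    funext j; ring
  rw [h2]
  congr 1

-- the DP columns: after the first K loop iterations, column m holds the K-bit states of popcount m
def pvSpecCols (K M : Nat) : List (List Int) :=
  (List.range (min K M + 1)).map (fun m : Nat => List.map (fun x : Nat => (x : Int)) (pvF K (m : Int)))

lemma pvSpecCols_length (K M : Nat) : (pvSpecCols K M).length = min K M + 1 := by
  unfold pvSpecCols
  simp

lemma pvSpecCols_get (K M j : Nat) (hj : j < min K M + 1) :
    PySem.List.pyGetD (pvSpecCols K M) (j : Int) [] = List.map (fun x : Nat => (x : Int)) (pvF K (j : Int)) := by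
  unfold pvSpecCols
  rw [PySem.List.pyGetD_natCast]
  exact PySem.List.getD_map_range _ _ _ _ hj

lemma pvColsUpto_eq_pvF (M : Nat) : ∀ K : Nat,
    pvColsUpto (K : Int) (M : Int) = pvSpecCols K M := by
  intro K
  induction K with
  | zero =>
    unfold pvColsUpto
    rw [PySem.List.pyRange_one_eq_nil (by norm_num)]
    rw [List.foldl_nil]
    unfold pvSpecCols
    rw [Nat.zero_min, Nat.zero_add, List.range_one, List.map_cons, List.map_nil,
      show pvF 0 ((0 : Nat) : Int) = [0] by simp [pvF, List.range_one, pvPopA_zero]]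
    rfl
  | succ K ih =>
    unfold pvColsUpto at ih ⊢
    rw [show ((K + 1 : Nat) : Int) = (K : Int) + 1 by push_cast; ring,
      PySem.List.pyRange_one_succ_right (by positivity), List.foldl_append, List.foldl_cons,
      List.foldl_nil, ih]
    -- one DP step
    unfold pvStep
    have hshift : ((1 : Int) <<< K) = 2 ^ K := by
      rw [Int.shiftLeft_eq]; ring
    -- both sides are 'column 0' consed onto a map over List.range (min (K+1) M)
    have hminc : min ((K : Int) + 1) (M : Int) + 1 - 1 = ((min (K + 1) M : Nat) : Int) := by
      rw [Nat.cast_min]; push_cast; omega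
    rw [PySem.List.pyRange_one, hminc, Int.toNat_natCast]
    conv_rhs => rw [pvSpecCols]
    rw [List.range_succ_eq_map, List.map_cons, List.map_map]
    congr 1
    · -- column 0: popcount-0 states do not change
      rw [show ((0 : Int)) = ((0 : Nat) : Int) from rfl, pvSpecCols_get K M 0 (by omega)]
      rw [show pvF (K + 1) ((0 : Nat) : Int) = pvF K ((0 : Nat) : Int) by
        rw [pvF_succ, pvF_nil K (((0 : Nat) : Int) - 1) (by left; norm_num)]; simp]
    · -- columns 1 .. min(K+1, M)
      rw [List.map_map]
      apply List.map_congr_left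
      intro j hj
      have hjlt : j < min (K + 1) M := List.mem_range.mp hj
      simp only [Function.comp]
      have hm1 : ((1 : Int) + (j : Int)) - 1 = (j : Int) := by ring
      have hmc : (1 : Int) + (j : Int) = ((j + 1 : Nat) : Int) := by push_cast; ring
      rw [hm1, pvSpecCols_get K M j (by omega), pvSpecCols_length, hmc]
      have hsub : ((j + 1 : Nat) : Int) - 1 = ((j : Nat) : Int) := by push_cast; ring
      have hmap : List.map (fun x => (1 : Int) <<< K + x)
            (List.map (fun x : Nat => (x : Int)) (pvF K ((j : Nat) : Int)))
          = List.map (fun x : Nat => (x : Int))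
            ((pvF K ((j : Nat) : Int)).map (fun x => 2 ^ K + x)) := by
        rw [List.map_map, List.map_map]
        apply List.map_congr_left
        intro x _
        simp only [Function.comp]
        rw [hshift]
        push_cast
        ring
      by_cases hc : ((j + 1 : Nat) : Int) < ((min K M + 1 : Nat) : Int)
      · rw [if_pos (by exact_mod_cast hc), pvSpecCols_get K M (j + 1) (by exact_mod_cast hc)]
        rw [pvF_succ K ((j + 1 : Nat) : Int), hsub, List.map_append, hmap]
      · -- the brand-new top column m = K+1 (only when K+1 ≤ M): cols has no column m yet,
        -- and indeed there are no K-bit states of popcount K+1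
        rw [if_neg (by exact_mod_cast hc)]
        have hj1 : j + 1 = K + 1 := by
          have := Nat.lt_of_lt_of_le hjlt (Nat.min_le_right _ _)
          have h2 := Nat.lt_of_lt_of_le hjlt (Nat.min_le_left _ _)
          have h3 : ¬ (j + 1 < min K M + 1) := fun h => hc (by exact_mod_cast h)
          omega
        have hnilK : pvF K ((j + 1 : Nat) : Int) = [] := by
          apply pvF_nil
          right
          exact_mod_cast Nat.lt_of_lt_of_le (by omega) (le_of_eq hj1.symm)
        rw [pvF_succ K ((j + 1 : Nat) : Int), hsub, hnilK, List.nil_append, List.nil_append, hmap]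

-- ===== VERDICT (by name: the statement is the Claim_ definition above) =====
theorem block_index_maps_py_spec : Claim_equal_block_index_maps_py := by
  intro N n _ hpre
  unfold Spec_block_index_maps_py
  obtain ⟨k, rfl⟩ : ∃ k : Nat, N = (k : Int) := ⟨N.toNat, (Int.toNat_of_nonneg hpre).symm⟩
  unfold block_index_maps_py block_index_maps_py_alt
  by_cases hneg : n + 1 < 0
  · -- n ≤ -2: both popcount blocks are empty
    rw [if_pos hneg, pcs_eq_pvF, pcs_eq_pvF, pvF_nil k n (by left; omega),
      pvF_nil k (n + 1) (by left; omega)]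
    simp
  · rw [if_neg hneg]
    obtain ⟨M, hM⟩ : ∃ M : Nat, n + 1 = (M : Int) := ⟨(n + 1).toNat, (Int.toNat_of_nonneg (by omega)).symm⟩
    rw [hM, pvColsUpto_eq_pvF M k]
    have hPn : (if 0 ≤ n ∧ n < ((pvSpecCols k M).length : Int)
          then PySem.List.pyGetD (pvSpecCols k M) n [] else [])
        = popcount_states (k : Int) n := by
      rw [pcs_eq_pvF]
      by_cases hn0 : 0 ≤ n
      · obtain ⟨m, rfl⟩ : ∃ m : Nat, n = (m : Int) := ⟨n.toNat, (Int.toNat_of_nonneg hn0).symm⟩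
        by_cases hin : m < min k M + 1
        · rw [if_pos ⟨hn0, by rw [pvSpecCols_length]; exact_mod_cast hin⟩, pvSpecCols_get k M m hin]
        · have hmM : m + 1 = M := by exact_mod_cast hM
          rw [if_neg (fun h => hin (by rw [pvSpecCols_length] at h; exact_mod_cast h.2)),
            pvF_nil k (m : Int) (by right; omega)]
          simp
      · rw [if_neg (fun h => hn0 h.1), pvF_nil k n (by left; omega)]
        simp
    have hPn1 : (if ((M : Nat) : Int) < ((pvSpecCols k M).length : Int)
          then PySem.List.pyGetD (pvSpecCols k M) ((M : Nat) : Int) [] else [])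
        = popcount_states (k : Int) ((M : Nat) : Int) := by
      rw [pcs_eq_pvF]
      by_cases hin : M < min k M + 1
      · rw [if_pos (by rw [pvSpecCols_length]; exact_mod_cast hin), pvSpecCols_get k M M hin]
      · rw [if_neg (fun h => hin (by rw [pvSpecCols_length] at h; exact_mod_cast h)),
          pvF_nil k (M : Int) (by right; omega)]
        simp
    simp only [hPn, hPn1]
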